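-- pv_equiv track=rewrite | github.com/lrs1353281004/New_coder | code_of_str.py | Get_dic_sort_number
-- ===== SOURCE A (Python) =====
-- def Get_dic_sort_number(s):
--     if not s or len(s)>4 :
--         return False
--     res = 0
--     for i in range(0,len(s)):
--         temp = 0
--         for j in range(0,4-i):
--             temp += 25**j
--         if i==0:
--             res += (ord(s[i])-ord('a'))*temp
--         else:
--             res += (ord(s[i])-ord('a'))*temp+1
--
--     return res
-- ===== SOURCE B (Python) =====
-- def Get_dic_sort_number(s):
--     if not s or len(s) > 4:
--         return False
--     res = len(s) - 1
--     for i, ch in enumerate(s):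
--         res += (ord(ch) - ord('a')) * ((25 ** (4 - i) - 1) // 24)
--     return res
-- ===== Notes on version B (the rewrite author's own statement) =====
-- stated objective: simpler
-- what changed: The nested inner loop accumulating temp as a sum of powers of 25 is replaced by its closed-form geometric sum (25**(4-i)-1)//24, and the per-index increment applied at every position after the first is folded into a single len(s)-1 initial value, leaving one flat enumerate loop.
-- outside the precondition, e.g. on Get_dic_sort_number(''): A returns False, B returns False; on Get_dic_sort_number('abcde'): A returns False, B returns False
import Mathlib
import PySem

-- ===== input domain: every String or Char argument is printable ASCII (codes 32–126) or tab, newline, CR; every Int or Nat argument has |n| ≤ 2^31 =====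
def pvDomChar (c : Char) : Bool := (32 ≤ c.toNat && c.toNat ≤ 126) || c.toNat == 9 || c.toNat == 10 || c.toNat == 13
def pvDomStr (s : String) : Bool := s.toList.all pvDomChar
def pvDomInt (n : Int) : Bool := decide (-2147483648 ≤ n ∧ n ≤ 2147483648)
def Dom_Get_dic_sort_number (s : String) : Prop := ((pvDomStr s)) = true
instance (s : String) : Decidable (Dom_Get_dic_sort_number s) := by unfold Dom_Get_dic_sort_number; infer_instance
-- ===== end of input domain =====

-- B replaces A's inner geometric-sum loop by its closed form (25^(4-i)-1)//24 and folds the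
-- per-index +1 into a len(s)-1 initial accumulator: one flat loop instead of nested loops.


-- ===== PORT A =====
def Get_dic_sort_number (s : String) : Int :=
  let cs := s.toList
  if cs.length = 0 ∨ 4 < cs.length then 0  -- Python returns False (a bool) here; outside Pre_
  else
    (List.range cs.length).foldl (fun res i =>
      let temp : Int := (List.range (4 - i)).foldl (fun t j => t + 25 ^ j) 0
      if i = 0 then res + (((cs[i]!).toNat : Int) - 97) * temp
      else res + (((cs[i]!).toNat : Int) - 97) * temp + 1) 0

-- ===== PORT B =====
def Get_dic_sort_number_alt (s : String) : Int :=
  let cs := s.toList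
  if cs.length = 0 ∨ 4 < cs.length then 0  -- Python returns False (a bool) here; outside Pre_
  else
    (PySem.List.enumerate cs).foldl (fun res p =>
      res + ((p.2.toNat : Int) - 97) * PySem.Int.floordiv (25 ^ (4 - p.1.toNat) - 1) 24)
      ((cs.length : Int) - 1)

-- ===== PRECONDITION & SPEC =====
-- Pre_ excludes the empty string and strings longer than 4, on which A returns the boolean
-- False instead of a value of the declared int type (B does the same there).
def Pre_Get_dic_sort_number (s : String) : Prop :=
  s.toList ≠ [] ∧ s.toList.length ≤ 4
instance (s : String) : Decidable (Pre_Get_dic_sort_number s) := by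
  unfold Pre_Get_dic_sort_number; infer_instance
def pvWitness_Get_dic_sort_number : String := "ab"

def Spec_Get_dic_sort_number (s : String) (out : Int) : Prop := out = Get_dic_sort_number_alt s
instance (s : String) (out : Int) : Decidable (Spec_Get_dic_sort_number s out) := by unfold Spec_Get_dic_sort_number; infer_instance

-- ===== CLAIM (what is proved, stated in full; the proofs are below) =====
def Claim_equal_Get_dic_sort_number : Prop := ∀ (s : String), Dom_Get_dic_sort_number s → Pre_Get_dic_sort_number s → Spec_Get_dic_sort_number s (Get_dic_sort_number s)

-- ===== LEMMAS AND PROOFS =====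

-- ===== VERDICT (by name: the statement is the Claim_ definition above) =====
theorem Get_dic_sort_number_spec : Claim_equal_Get_dic_sort_number := by
  intro s _ hpre
  obtain ⟨hne, hle⟩ := hpre
  unfold Spec_Get_dic_sort_number Get_dic_sort_number Get_dic_sort_number_alt
  rcases hl : s.toList with _ | ⟨a, _ | ⟨b, _ | ⟨c, _ | ⟨d, _ | ⟨e, t⟩⟩⟩⟩⟩ <;>
    simp_all [List.range, List.range.loop, PySem.List.enumerate, PySem.Int.floordiv] <;>
    ring
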